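-- pv_equiv track=rewrite | github.com/ghartiSH/Binary-Adder---Python | BinaryAdder.py | ReverseSum
-- ===== SOURCE A (Python) =====
-- def ReverseSum(sumList):
--     actualSum=""
--     newList=[]
--     for i in range(len(sumList)-1,-1,-1):
--         if sumList[i]==1:
--             for j in range(i,-1,-1):
--                 newList.append(sumList[j])
--             break
--     for k in range(0,len(newList)):
--         actualSum=actualSum + str(newList[k])
--     return actualSum
-- ===== SOURCE B (Python) =====
-- def ReverseSum(sumList):
--     parts = []
--     keep = 0
--     for x in sumList:
--         parts.append(str(x))
--         if x == 1:
--             keep = len(parts)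
--     return ''.join(reversed(parts[:keep]))
-- ===== Notes on version B (the rewrite author's own statement) =====
-- stated objective: simpler
-- what changed: Replaced A's backward scan for the last 1 plus backward index-copy into a temp list plus a third joining loop by one forward pass that appends str(x) to a parts list and remembers the cut length at each 1, joining the reversed kept prefix once at the end.
import Mathlib
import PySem

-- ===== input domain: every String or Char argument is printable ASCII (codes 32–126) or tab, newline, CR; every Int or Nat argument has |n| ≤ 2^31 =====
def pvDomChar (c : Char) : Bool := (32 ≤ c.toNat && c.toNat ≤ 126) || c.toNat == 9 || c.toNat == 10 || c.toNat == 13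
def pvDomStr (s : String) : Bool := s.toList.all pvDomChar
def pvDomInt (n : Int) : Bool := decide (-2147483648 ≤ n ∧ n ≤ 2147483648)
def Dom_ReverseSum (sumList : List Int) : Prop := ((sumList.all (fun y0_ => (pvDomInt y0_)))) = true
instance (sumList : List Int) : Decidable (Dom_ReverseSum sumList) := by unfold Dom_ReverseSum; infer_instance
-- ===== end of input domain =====

-- ===== PORT A =====
-- B replaces A's backward locate + backward copy + join with one forward pass keeping a
-- reversed-prefix string snapshotted at every 1 (objective: simpler; same cost).

-- inner loop: for j in range(i,-1,-1): newList.append(sumList[j])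
def pvAInner (xs : List Int) : Nat → List Int
  | 0 => [PySem.List.pyGetD xs (0 : Int) 0]
  | i + 1 => PySem.List.pyGetD xs ((i : Int) + 1) 0 :: pvAInner xs i

-- outer loop: for i in range(len(sumList)-1,-1,-1): if sumList[i]==1: <inner>; break
def pvAOuter (xs : List Int) : Nat → List Int
  | 0 => if PySem.List.pyGetD xs (0 : Int) 0 = 1 then pvAInner xs 0 else []
  | i + 1 => if PySem.List.pyGetD xs ((i : Int) + 1) 0 = 1 then pvAInner xs (i + 1)
             else pvAOuter xs i

def ReverseSum (sumList : List Int) : String :=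
  let newList := if sumList.length = 0 then [] else pvAOuter sumList (sumList.length - 1)
  -- for k in range(0,len(newList)): actualSum = actualSum + str(newList[k])
  (PySem.List.pyRange 0 (newList.length : Int) 1).foldl
    (fun s k => s ++ PySem.Int.toStr (PySem.List.pyGetD newList k 0)) ""

-- ===== PORT B =====
def ReverseSum_alt (sumList : List Int) : String :=
  let st := sumList.foldl
    (fun (p : List String × Nat) x =>
      let parts := p.1 ++ [PySem.Int.toStr x]
      (parts, if x = 1 then parts.length else p.2))
    ([], 0)
  String.join ((st.1.take st.2).reverse)

-- ===== PRECONDITION & SPEC =====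
def Spec_ReverseSum (sumList : List Int) (out : String) : Prop := out = ReverseSum_alt sumList
instance (sumList : List Int) (out : String) : Decidable (Spec_ReverseSum sumList out) := by unfold Spec_ReverseSum; infer_instance

-- ===== CLAIM (what is proved, stated in full; the proofs are below) =====
def Claim_equal_ReverseSum : Prop := ∀ (sumList : List Int), Dom_ReverseSum sumList → Spec_ReverseSum sumList (ReverseSum sumList)

-- ===== LEMMAS AND PROOFS =====

-- jstr l = str(l[0]) + str(l[1]) + …
def jstr : List Int → String
  | [] => ""
  | x :: r => PySem.Int.toStr x ++ jstr r

-- common spec, by recursion on the REVERSED list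
def pvS : List Int → String
  | [] => ""
  | x :: r => if x = 1 then PySem.Int.toStr x ++ jstr r else pvS r

theorem foldl_jstr (l : List Int) (s : String) :
    l.foldl (fun s v => s ++ PySem.Int.toStr v) s = s ++ jstr l := by
  induction l generalizing s with
  | nil => simp [jstr]
  | cons x t ih => simp [List.foldl, jstr, ih, String.append_assoc]

theorem pyGetD_succ (xs : List Int) (i : Nat) :
    PySem.List.pyGetD xs ((i : Int) + 1) 0 = xs.getD (i + 1) 0 := by
  rw [show ((i : Int) + 1) = (((i + 1 : Nat)) : Int) by push_cast; ring,
    PySem.List.pyGetD_natCast]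

theorem inner_eq (xs : List Int) (i : Nat) (h : i < xs.length) :
    pvAInner xs i = (xs.take (i + 1)).reverse := by
  induction i with
  | zero =>
    simp [pvAInner, PySem.List.pyGetD_zero, List.getD_eq_getElem?_getD,
      List.getElem?_eq_getElem h, List.take_add_one]
  | succ k ih =>
    have hk : k < xs.length := Nat.lt_of_succ_lt h
    rw [pvAInner, pyGetD_succ, ih hk]
    simp [List.getD_eq_getElem?_getD, List.getElem?_eq_getElem h, List.take_add_one]

theorem getD_append_left (ys : List Int) (x : Int) (i : Nat) (h : i < ys.length) :
    (ys ++ [x]).getD i 0 = ys.getD i 0 := by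
  simp [List.getD_eq_getElem?_getD, List.getElem?_append_left h]

theorem getD_append_length (ys : List Int) (x : Int) :
    (ys ++ [x]).getD ys.length 0 = x := by
  simp [List.getD_eq_getElem?_getD]

theorem inner_append (ys : List Int) (x : Int) (i : Nat) (h : i < ys.length) :
    pvAInner (ys ++ [x]) i = pvAInner ys i := by
  rw [inner_eq (ys ++ [x]) i (by simp; omega), inner_eq ys i h,
    List.take_append_of_le_length (by omega)]

theorem outer_append (ys : List Int) (x : Int) (i : Nat) (h : i < ys.length) :
    pvAOuter (ys ++ [x]) i = pvAOuter ys i := by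
  induction i with
  | zero =>
    rw [pvAOuter, pvAOuter, PySem.List.pyGetD_zero, PySem.List.pyGetD_zero,
      getD_append_left ys x 0 h, inner_append ys x 0 h]
  | succ k ih =>
    rw [pvAOuter, pvAOuter, pyGetD_succ, pyGetD_succ,
      getD_append_left ys x (k + 1) h, inner_append ys x (k + 1) h, ih (by omega)]

-- A's newList, joined, equals the spec on the reversed input
theorem A_eq_pvS (xs : List Int) :
    jstr (if xs.length = 0 then [] else pvAOuter xs (xs.length - 1)) = pvS xs.reverse := by
  induction xs using List.reverseRecOn with
  | nil => simp [jstr, pvS]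
  | append_singleton ys x ih =>
    rw [show (ys ++ [x]).length = ys.length + 1 by simp, Nat.add_sub_cancel,
      if_neg (by omega : ¬ ys.length + 1 = 0)]
    cases hm : ys.length with
    | zero =>
      have hys : ys = [] := List.eq_nil_of_length_eq_zero hm
      subst hys
      simp only [List.nil_append]
      by_cases hx : x = 1
      · subst hx; decide
      · simp [pvAOuter, pvS, jstr, hx, PySem.List.pyGetD_zero, List.getD]
    | succ k =>
      rw [pvAOuter, pyGetD_succ]
      have hgx : (ys ++ [x]).getD (k + 1) 0 = x := by
        rw [← hm]; exact getD_append_length ys x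
      rw [hgx]
      by_cases hx : x = 1
      · rw [if_pos hx, inner_eq (ys ++ [x]) (k + 1) (by simp; omega),
          List.take_of_length_le (by simp; omega)]
        simp [pvS, hx, jstr]
      · rw [if_neg hx, outer_append ys x k (by omega)]
        have ihy := ih
        rw [if_neg (by omega : ¬ ys.length = 0), hm, Nat.add_sub_cancel] at ihy
        rw [ihy]
        simp [pvS, hx]

-- keep-counter on the REVERSED list: position after the last 1
def pvK : List Int → Nat
  | [] => 0
  | x :: r => if x = 1 then r.length + 1 else pvK r

theorem pvK_le (l : List Int) : pvK l ≤ l.length := by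
  induction l with
  | nil => simp [pvK]
  | cons x r ih =>
    by_cases hx : x = 1
    · simp [pvK, hx]
    · simp [pvK, hx]; omega

theorem foldl_join (t : List String) (s : String) :
    t.foldl (· ++ ·) s = s ++ t.foldl (· ++ ·) "" := by
  induction t generalizing s with
  | nil => simp
  | cons a r ih =>
    simp only [List.foldl]
    rw [ih (s ++ a), ih ("" ++ a)]
    simp [String.append_assoc]

theorem join_map_toStr (l : List Int) : String.join (l.map PySem.Int.toStr) = jstr l := by
  induction l with
  | nil => simp [jstr, String.join]
  | cons x r ih =>
    simp only [List.map, jstr, String.join] at *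
    rw [List.foldl, foldl_join]
    simp [ih]

-- B's fold carries (string parts in order, cut position after the last 1)
theorem B_fold (xs : List Int) :
    xs.foldl
      (fun (p : List String × Nat) x =>
        let parts := p.1 ++ [PySem.Int.toStr x]
        (parts, if x = 1 then parts.length else p.2))
      ([], 0) = (xs.map PySem.Int.toStr, pvK xs.reverse) := by
  induction xs using List.reverseRecOn with
  | nil => simp [pvK]
  | append_singleton ys x ih =>
    rw [List.foldl_concat, ih]
    simp [pvK]

-- the kept prefix of B, reversed and joined, equals the spec on the reversed input
theorem B_eq_pvS (xs : List Int) :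
    jstr ((xs.take (pvK xs.reverse)).reverse) = pvS xs.reverse := by
  induction xs using List.reverseRecOn with
  | nil => simp [jstr, pvS, pvK]
  | append_singleton ys x ih =>
    simp only [List.reverse_append, List.reverse_cons, List.reverse_nil, List.nil_append,
      List.cons_append, pvK, pvS]
    by_cases hx : x = 1
    · rw [if_pos hx, if_pos hx,
        List.take_of_length_le (by simp), List.reverse_append]
      simp [jstr, hx]
    · rw [if_neg hx, if_neg hx,
        List.take_append_of_le_length (by simpa using pvK_le ys.reverse)]
      exact ih

-- ===== VERDICT (by name: the statement is the Claim_ definition above) =====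
theorem ReverseSum_spec : Claim_equal_ReverseSum := by
  intro xs _
  unfold Spec_ReverseSum ReverseSum ReverseSum_alt
  rw [B_fold]
  rw [show ∀ (l : List Int),
        (PySem.List.pyRange 0 (l.length : Int) 1).foldl
          (fun s k => s ++ PySem.Int.toStr (PySem.List.pyGetD l k 0)) ""
        = l.foldl (fun s v => s ++ PySem.Int.toStr v) "" from
      fun l => PySem.List.foldl_pyRange_zero_pyGetD l 0
        (fun s v => s ++ PySem.Int.toStr v) ""]
  rw [foldl_jstr, A_eq_pvS]
  simp only [← List.map_take, ← List.map_reverse, join_map_toStr]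
  rw [B_eq_pvS]
  simp
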